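-- pv_equiv track=rewrite | github.com/ApurbaKumarNath/dsa | 3_Algorithms/Lab work/Lab 3/F.py | find_postorder
-- ===== SOURCE A (Python) =====
-- def find_postorder(inorder, preorder):
--     inorder_map = {} # mapping of value to index for inorder
--     for i in range(len(inorder)):
--         inorder_map[inorder[i]] = i
--
--     postorder = []
--
--     def build_postorder(pre_start, pre_end, in_start, in_end):
--         if pre_start > pre_end or in_start > in_end:
--             return
--
--         root_val = preorder[pre_start] # 1st elem in preorder is root
--
--         root_inorder_idx = inorder_map[root_val] # Find position of root in inorder
--
--         left_size = root_inorder_idx - in_start # Calculate size of left subtree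
--
--         build_postorder(pre_start + 1, pre_start + left_size, in_start, root_inorder_idx - 1)
--         build_postorder(pre_start + left_size + 1, pre_end, root_inorder_idx + 1, in_end)
--
--
--         postorder.append(root_val) # Add root to postorder (visit after both subtrees)
--
--     build_postorder(0, len(preorder) - 1, 0, len(inorder) - 1)
--     return postorder
-- ===== SOURCE B (Python) =====
-- def find_postorder(inorder, preorder):
--     inorder_map = {}
--     for i, v in enumerate(inorder):
--         inorder_map[v] = i
--     out = []
--     # Iterative traversal: each frame is a (preorder range, inorder range) pair.
--     # Emit each root on arrival and push left below right, so `out` accumulates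
--     # the reverse postorder (root, right subtree, left subtree); reverse at the end.
--     stack = [(0, len(preorder) - 1, 0, len(inorder) - 1)]
--     while stack:
--         pre_start, pre_end, in_start, in_end = stack.pop()
--         if pre_start > pre_end or in_start > in_end:
--             continue
--         root_val = preorder[pre_start]
--         root_inorder_idx = inorder_map[root_val]
--         left_size = root_inorder_idx - in_start
--         out.append(root_val)
--         stack.append((pre_start + 1, pre_start + left_size, in_start, root_inorder_idx - 1))
--         stack.append((pre_start + left_size + 1, pre_end, root_inorder_idx + 1, in_end))
--     out.reverse()
--     return out
-- ===== Notes on version B (the rewrite author's own statement) =====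
-- stated objective: alternative
-- what changed: Replaces A's recursive left-right-root emission (appending roots after both recursive calls) with an explicit stack machine that emits reverse postorder (root, then right subtree before left) and reverses the list once at the end; Pre_ admits only genuine traversal pairs of one tree (or an empty list), excluding malformed pairs on which A raises or returns an accidental partial answer.
-- outside the precondition, e.g. on find_postorder([0], [0, 7]): A returns [0], B returns [0]
import Mathlib
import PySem

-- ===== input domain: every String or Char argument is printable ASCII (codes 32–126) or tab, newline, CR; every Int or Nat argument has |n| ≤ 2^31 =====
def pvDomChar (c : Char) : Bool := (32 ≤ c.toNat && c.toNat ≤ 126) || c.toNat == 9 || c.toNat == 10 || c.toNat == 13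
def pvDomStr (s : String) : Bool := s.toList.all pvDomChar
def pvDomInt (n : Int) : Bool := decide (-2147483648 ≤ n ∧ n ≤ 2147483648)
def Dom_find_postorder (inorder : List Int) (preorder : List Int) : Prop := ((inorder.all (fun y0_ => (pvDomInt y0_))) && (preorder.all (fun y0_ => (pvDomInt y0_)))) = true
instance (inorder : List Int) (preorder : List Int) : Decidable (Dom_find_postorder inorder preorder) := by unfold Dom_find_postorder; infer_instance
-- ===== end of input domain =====

-- B rewrites A's recursion (left, right, then append root) as an explicit stack machine
-- that emits reverse postorder (root, then right before left) and reverses once at the end.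

-- ===== PORT A =====
-- The Python recursion need not terminate on malformed inputs (Python then raises
-- RecursionError, outside Pre_): the port carries a depth fuel, large enough that it is
-- never exhausted on any input of Pre_ (tree depth ≤ n). A Python exception
-- (IndexError/KeyError, none from pyGet?/get?) makes the call return acc; such inputs
-- are likewise outside Pre_.
def pvBuildA (preorder : List Int) (m : PySem.Dict Int Int) :
    Nat → Int → Int → Int → Int → List Int → List Int
  | 0, _, _, _, _, acc => acc
  | F+1, ps, pe, s, e, acc =>
    if ps > pe ∨ s > e then acc else
    match PySem.List.pyGet? preorder ps with
    | none => acc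
    | some root_val =>
      match m.get? root_val with
      | none => acc
      | some idx =>
        let left_size := idx - s
        let acc1 := pvBuildA preorder m F (ps+1) (ps+left_size) s (idx-1) acc
        let acc2 := pvBuildA preorder m F (ps+left_size+1) pe (idx+1) e acc1
        acc2 ++ [root_val]

def find_postorder (inorder : List Int) (preorder : List Int) : List Int :=
  pvBuildA preorder
    ((PySem.List.pyRange 0 inorder.length 1).foldl
      (fun d i => d.insert (PySem.List.pyGetD inorder i 0) i) PySem.Dict.empty)
    (inorder.length + preorder.length + 1000)
    0 ((preorder.length : Int) - 1) 0 ((inorder.length : Int) - 1) []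

-- ===== PORT B =====
-- Frames are (pre_start, pre_end, in_start, in_end). Source B's while loop carries no fuel;
-- it need not terminate on malformed inputs (outside Pre_), so the Lean port threads a
-- per-frame Nat fuel PURELY to justify termination to Lean — on every input admitted by
-- Pre_ the nesting depth is at most n, far below the initial fuel, so the fuel branch is
-- never taken there.  stack.append(left); stack.append(right) puts right on top, so the
-- list head is the right-subtree frame.
def pvLoopB (preorder : List Int) (m : PySem.Dict Int Int) :
    List (Nat × Int × Int × Int × Int) → List Int → List Int
  | [], out => out
  | (0, _, _, _, _) :: st, out => pvLoopB preorder m st out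
  | (F+1, ps, pe, s, e) :: st, out =>
    if ps > pe ∨ s > e then pvLoopB preorder m st out else
    match PySem.List.pyGet? preorder ps with
    | none => pvLoopB preorder m st out
    | some root_val =>
      match m.get? root_val with
      | none => pvLoopB preorder m st out
      | some idx =>
        let left_size := idx - s
        pvLoopB preorder m
          ((F, ps+left_size+1, pe, idx+1, e) :: (F, ps+1, ps+left_size, s, idx-1) :: st)
          (out ++ [root_val])
termination_by st _ => (st.map (fun f => 3 ^ f.1)).sum
decreasing_by
  all_goals simp [pow_succ]
  all_goals first
    | omega
    | (have h3 : 0 < 3 ^ F := pow_pos (by norm_num) F; omega)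

def find_postorder_alt (inorder : List Int) (preorder : List Int) : List Int :=
  (pvLoopB preorder
    ((PySem.List.enumerate inorder 0).foldl (fun d p => d.insert p.2 p.1) PySem.Dict.empty)
    [(inorder.length + preorder.length + 1000,
      0, (preorder.length : Int) - 1, 0, (inorder.length : Int) - 1)] []).reverse

-- ===== PRECONDITION & SPEC =====
-- Pre_: either list empty (both programs trivially return []), or the two lists are the
-- preorder and inorder traversals of one binary tree with distinct values — with distinct
-- values this is exactly: same multiset, and the inorder-index sequence of preorder avoids
-- the pattern 231.  Outside Pre_ Python A raises (KeyError/IndexError/RecursionError); on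
-- a few inconsistent pairs (extra preorder junk that falls outside every scanned range) A
-- happens to return a partial answer — those stay excluded as accidents of A's range
-- arithmetic, and Source B's loop need not terminate on malformed pairs (see cites).
def Pre_find_postorder (inorder : List Int) (preorder : List Int) : Prop :=
  preorder = [] ∨ inorder = [] ∨
  (inorder.Nodup ∧ preorder.Perm inorder ∧
    ∀ k, k < preorder.length → ∀ j, j < k → ∀ i, i < j →
      ¬ (inorder.idxOf (preorder.getD k 0) < inorder.idxOf (preorder.getD i 0) ∧
         inorder.idxOf (preorder.getD i 0) < inorder.idxOf (preorder.getD j 0)))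
instance (inorder : List Int) (preorder : List Int) : Decidable (Pre_find_postorder inorder preorder) := by
  unfold Pre_find_postorder; infer_instance

def pvWitness_find_postorder : List Int × List Int := ([4, 2, 5, 1, 3], [1, 2, 4, 5, 3])

def Spec_find_postorder (inorder : List Int) (preorder : List Int) (out : List Int) : Prop := out = find_postorder_alt inorder preorder
instance (inorder : List Int) (preorder : List Int) (out : List Int) : Decidable (Spec_find_postorder inorder preorder out) := by unfold Spec_find_postorder; infer_instance

-- ===== CLAIM (what is proved, stated in full; the proofs are below) =====
def Claim_equal_find_postorder : Prop := ∀ (inorder : List Int) (preorder : List Int), Dom_find_postorder inorder preorder → Pre_find_postorder inorder preorder → Spec_find_postorder inorder preorder (find_postorder inorder preorder)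

-- ===== LEMMAS AND PROOFS =====
-- pvG F frame = the reverse-postorder contribution of one frame (root, right, left).
def pvG (preorder : List Int) (m : PySem.Dict Int Int) :
    Nat → Int × Int × Int × Int → List Int
  | 0, _ => []
  | F+1, (ps, pe, s, e) =>
    if ps > pe ∨ s > e then [] else
    match PySem.List.pyGet? preorder ps with
    | none => []
    | some root_val =>
      match m.get? root_val with
      | none => []
      | some idx =>
        let left_size := idx - s
        root_val :: (pvG preorder m F (ps+left_size+1, pe, idx+1, e) ++
                     pvG preorder m F (ps+1, ps+left_size, s, idx-1))

theorem pvBuildA_eq (preorder : List Int) (m : PySem.Dict Int Int) (F : Nat) :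
    ∀ ps pe s e acc, pvBuildA preorder m F ps pe s e acc
      = acc ++ (pvG preorder m F (ps, pe, s, e)).reverse := by
  induction F with
  | zero => intro ps pe s e acc; simp [pvBuildA, pvG]
  | succ F ih =>
    intro ps pe s e acc
    rw [pvBuildA, pvG]
    split
    · simp
    · cases hg : PySem.List.pyGet? preorder ps with
      | none => simp
      | some rv =>
        cases hm : m.get? rv with
        | none => simp [hm]
        | some idx => simp [hm, ih, List.append_assoc]

theorem pvLoopB_eq (preorder : List Int) (m : PySem.Dict Int Int) :
    ∀ st out, pvLoopB preorder m st out
      = out ++ (st.map (fun f => pvG preorder m f.1 f.2)).flatten := by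
  intro st out
  induction st, out using pvLoopB.induct preorder m with
  | case1 out => rw [pvLoopB]; simp
  | case2 a b c d st out ih => rw [pvLoopB]; simp [pvG, ih]
  | case3 F ps pe s e st out hbad ih => rw [pvLoopB]; simp [hbad, pvG, ih]
  | case4 F ps pe s e st out hbad hg ih =>
    rw [pvLoopB]; simp [hbad, hg, pvG, ih]
  | case5 F ps pe s e st out hbad rv hg hm ih =>
    rw [pvLoopB]; simp [hbad, hg, hm, pvG, ih]
  | case6 F ps pe s e st out hbad rv hg idx hm ls ih =>
    rw [pvLoopB]
    have hls : ls = idx - s := rfl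
    rw [hls] at ih
    simp [hbad, hg, hm, ih]
    conv_rhs => rw [pvG.eq_def]
    simp [hbad, hg, hm, List.append_assoc]

theorem pvMaps_eq (inorder : List Int) :
    (PySem.List.enumerate inorder 0).foldl (fun d p => d.insert p.2 p.1) PySem.Dict.empty
      = (PySem.List.pyRange 0 inorder.length 1).foldl
          (fun d i => d.insert (PySem.List.pyGetD inorder i 0) i) PySem.Dict.empty := by
  rw [PySem.List.enumerate_eq_map_pyRange (d := 0), List.foldl_map]
  simp

-- ===== VERDICT (by name: the statement is the Claim_ definition above) =====
theorem find_postorder_spec : Claim_equal_find_postorder := by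
  intro inorder preorder _ _
  unfold Spec_find_postorder find_postorder find_postorder_alt
  rw [pvMaps_eq, pvBuildA_eq, pvLoopB_eq]
  simp
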